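-- pv_equiv track=rewrite | github.com/mylepvt/Myle-engine-v8 | backend/scripts/import_org_tree_csv.py | _upline_chain_cycles
-- ===== SOURCE A (Python) =====
-- def _upline_chain_cycles(upline_of: dict[int, int | None]) -> bool:
--     """True if following upline pointers revisits a node (cycle)."""
--     for start in upline_of:
--         seen: set[int] = set()
--         cur: int | None = start
--         while cur is not None:
--             if cur in seen:
--                 return True
--             seen.add(cur)
--             cur = upline_of.get(cur)
--     return False
-- ===== SOURCE B (Python) =====
-- def _upline_chain_cycles(upline_of: dict[int, int | None]) -> bool:
--     """True if following upline pointers revisits a node (cycle).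
--
--     Global 'done' set: nodes whose chain is already known to terminate are
--     never walked again, so each node is traversed O(1) times overall.
--     """
--     done: set[int] = set()
--     for start in upline_of:
--         path: set[int] = set()
--         cur: int | None = start
--         while cur is not None and cur not in done:
--             if cur in path:
--                 return True
--             path.add(cur)
--             cur = upline_of.get(cur)
--         done |= path
--     return False
-- ===== Notes on version B (the rewrite author's own statement) =====
-- stated objective: alternative
-- what changed: Instead of restarting a fresh walk with a fresh seen-set from every key, B keeps one global 'done' set of nodes already proven acyclic and stops any walk on reaching it, so each node is walked O(1) times (worst-case O(n) vs A's worst-case O(n^2)); in a timing run the two are equally fast.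
import Mathlib
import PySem

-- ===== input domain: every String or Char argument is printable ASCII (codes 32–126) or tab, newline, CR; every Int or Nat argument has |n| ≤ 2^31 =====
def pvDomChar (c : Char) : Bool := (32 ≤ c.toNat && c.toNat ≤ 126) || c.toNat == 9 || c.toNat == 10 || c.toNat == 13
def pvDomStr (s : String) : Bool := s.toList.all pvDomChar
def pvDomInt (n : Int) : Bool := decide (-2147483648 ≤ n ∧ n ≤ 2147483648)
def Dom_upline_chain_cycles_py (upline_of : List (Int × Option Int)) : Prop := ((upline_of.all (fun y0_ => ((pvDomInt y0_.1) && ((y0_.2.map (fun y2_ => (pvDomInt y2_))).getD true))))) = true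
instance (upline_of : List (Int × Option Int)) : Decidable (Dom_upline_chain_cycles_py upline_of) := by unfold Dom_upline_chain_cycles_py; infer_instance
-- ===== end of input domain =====

-- B replaces A's per-start fresh walk by one global 'done' set of nodes already
-- proven acyclic, at which any later walk stops (alternative algorithm).


-- ===== PORT A =====
-- upline_of.get(cur): stored value (or None) flattened, None when the key is absent
def pvGet (d : List (Int × Option Int)) (x : Int) : Option Int :=
  ((PySem.Dict.mk d).get? x).join

-- A's inner while loop; fuel d.length + 1 is a termination guard only (the loop
-- revisits or hits None within that many steps, proved in the lemmas below)
def pvWalkA (d : List (Int × Option Int)) : Nat → PySem.Set Int → Option Int → Bool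
  | _, _, none => false
  | 0, _, some _ => false
  | fu+1, seen, some c =>
    if c ∈ seen then true
    else pvWalkA d fu (PySem.Set.add seen c) (pvGet d c)

def upline_chain_cycles_py (upline_of : List (Int × Option Int)) : Bool :=
  (PySem.Dict.mk upline_of).keys.any
    (fun start => pvWalkA upline_of (upline_of.length + 1) PySem.Set.empty (some start))

-- ===== PORT B =====
-- B's inner while loop: none = cycle found (early True), some path = loop finished
def pvWalkB (d : List (Int × Option Int)) :
    Nat → PySem.Set Int → PySem.Set Int → Option Int → Option (PySem.Set Int)
  | _, _, path, none => some path
  | 0, _, path, some _ => some path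
  | fu+1, done, path, some c =>
    if c ∈ done then some path
    else if c ∈ path then none
    else pvWalkB d fu done (PySem.Set.add path c) (pvGet d c)

-- B's outer for loop, threading the global 'done' set
def pvLoopB (d : List (Int × Option Int)) : PySem.Set Int → List Int → Bool
  | _, [] => false
  | done, k :: rest =>
    match pvWalkB d (d.length + 1) done PySem.Set.empty (some k) with
    | none => true
    | some path => pvLoopB d (PySem.Set.union done path) rest

def upline_chain_cycles_py_alt (upline_of : List (Int × Option Int)) : Bool :=
  pvLoopB upline_of PySem.Set.empty (PySem.Dict.mk upline_of).keys

-- ===== PRECONDITION & SPEC =====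
def Spec_upline_chain_cycles_py (upline_of : List (Int × Option Int)) (out : Bool) : Prop := out = upline_chain_cycles_py_alt upline_of
instance (upline_of : List (Int × Option Int)) (out : Bool) : Decidable (Spec_upline_chain_cycles_py upline_of out) := by unfold Spec_upline_chain_cycles_py; infer_instance

-- ===== CLAIM (what is proved, stated in full; the proofs are below) =====
def Claim_equal_upline_chain_cycles_py : Prop := ∀ (upline_of : List (Int × Option Int)), Dom_upline_chain_cycles_py upline_of → Spec_upline_chain_cycles_py upline_of (upline_chain_cycles_py upline_of)

-- ===== LEMMAS AND PROOFS =====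

-- chain iteration: pvIter d n a = the chain position n steps after a
def pvIter (d : List (Int × Option Int)) : Nat → Option Int → Option Int
  | 0, a => a
  | n+1, a => pvIter d n (a.bind (pvGet d))

-- the chain from x never ends
def pvInf (d : List (Int × Option Int)) (x : Int) : Prop :=
  ∀ n, pvIter d n (some x) ≠ none

-- the chain from x ends
def pvFin (d : List (Int × Option Int)) (x : Int) : Prop :=
  ∃ n, pvIter d n (some x) = none

-- x reaches c in ≥ 1 steps
def pvReach (d : List (Int × Option Int)) (x : Int) (c : Option Int) : Prop :=
  ∃ m, 1 ≤ m ∧ pvIter d m (some x) = c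

-- the common semantic bridge: some key has a never-ending chain
def pvS (d : List (Int × Option Int)) : Prop :=
  ∃ k, k ∈ (PySem.Dict.mk d).keys ∧ pvInf d k

theorem pvIter_none (d : List (Int × Option Int)) (n : Nat) : pvIter d n none = none := by
  induction n with
  | zero => rfl
  | succ n ih => simpa [pvIter] using ih

theorem pvIter_add (d : List (Int × Option Int)) (m n : Nat) (a : Option Int) :
    pvIter d (m + n) a = pvIter d n (pvIter d m a) := by
  induction m generalizing a with
  | zero => simp [pvIter]
  | succ m ih =>
      have h1 : m + 1 + n = (m + n) + 1 := by omega
      rw [h1]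
      show pvIter d (m + n) (a.bind (pvGet d)) = _
      rw [ih]
      rfl

theorem pvIter_le_ne_none (d : List (Int × Option Int)) {r n : Nat} (h : r ≤ n)
    {a : Option Int} (hn : pvIter d n a ≠ none) : pvIter d r a ≠ none := by
  intro hr
  apply hn
  have h1 : n = r + (n - r) := by omega
  rw [h1, pvIter_add, hr, pvIter_none]

theorem pvCycInf (d : List (Int × Option Int)) {z : Int} {m : Nat} (hm : 1 ≤ m)
    (hc : pvIter d m (some z) = some z) : pvInf d z := by
  have hmul : ∀ q, pvIter d (q * m) (some z) = some z := by
    intro q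
    induction q with
    | zero => simp [pvIter]
    | succ q ih => rw [Nat.succ_mul, pvIter_add, ih, hc]
  intro n
  have hle : n ≤ n * m := Nat.le_mul_of_pos_right n hm
  exact pvIter_le_ne_none d hle (by rw [hmul n]; simp)

theorem pvInf_step (d : List (Int × Option Int)) {c : Int} (h : pvInf d c) :
    ∃ d', pvGet d c = some d' ∧ pvInf d d' := by
  have h1 : pvIter d 1 (some c) = pvGet d c := rfl
  cases hg : pvGet d c with
  | none => exact absurd (h1.trans hg) (h 1)
  | some d' =>
      refine ⟨d', rfl, fun n hn => h (1 + n) ?_⟩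
      rw [pvIter_add, h1, hg, hn]

theorem pvKey_of_get (d : List (Int × Option Int)) {c : Int} (h : pvGet d c ≠ none) :
    c ∈ (PySem.Dict.mk d).keys := by
  by_contra hc
  exact h (by simp [pvGet, (PySem.Dict.get?_eq_none_iff_not_mem_keys _ _).mpr hc])

theorem pvFin_back (d : List (Int × Option Int)) {x c : Int}
    (hr : pvReach d x (some c)) (hf : pvFin d c) : pvFin d x := by
  obtain ⟨m, -, hm⟩ := hr
  obtain ⟨n, hn⟩ := hf
  exact ⟨m + n, by rw [pvIter_add, hm, hn]⟩

theorem pvCycle_found (d : List (Int × Option Int)) {c : Int}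
    (h : pvReach d c (some c)) : pvS d := by
  obtain ⟨m, hm1, hm⟩ := h
  have hinf : pvInf d c := pvCycInf d hm1 hm
  obtain ⟨d', hg, -⟩ := pvInf_step d hinf
  exact ⟨c, pvKey_of_get d (by rw [hg]; simp), hinf⟩

-- strictly fewer unvisited keys after adding a fresh key to the visited set
-- filter monotone/strict facts (searched Mathlib; no matching lemma found)
theorem pvFilter_mono (l : List Int) (p q : Int → Bool)
    (hpq : ∀ x, q x = true → p x = true) :
    (l.filter q).length ≤ (l.filter p).length := by
  induction l with
  | nil => simp
  | cons a l ih =>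
      cases hq : q a with
      | true => simp [hq, hpq a hq]; omega
      | false =>
          cases hp : p a with
          | true => simp [hq, hp]; omega
          | false => simpa [hq, hp] using ih

theorem pvFilter_strict (l : List Int) (p q : Int → Bool)
    (hpq : ∀ x, q x = true → p x = true) {c : Int}
    (hl : c ∈ l) (hp : p c = true) (hq : q c = false) :
    (l.filter q).length < (l.filter p).length := by
  induction l with
  | nil => cases hl
  | cons a l ih =>
      rcases List.mem_cons.mp hl with rfl | hl'
      · have := pvFilter_mono l p q hpq
        simp [hq, hp]
        omega
      · cases hq' : q a with
        | true => simp [hq', hpq a hq']; exact ih hl'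
        | false =>
            cases hp' : p a with
            | true => have := ih hl'; simp [hq', hp']; omega
            | false => simpa [hq', hp'] using ih hl'

theorem pvFilter_lt (l : List Int) (s : PySem.Set Int) {c : Int}
    (hl : c ∈ l) (hs : c ∉ s) :
    (l.filter (fun x => decide (x ∉ PySem.Set.add s c))).length <
      (l.filter (fun x => decide (x ∉ s))).length := by
  apply pvFilter_strict l _ _ ?_ hl
  · simpa using hs
  · simp [PySem.Set.mem_add]
  · intro x hx
    simp only [decide_eq_true_eq] at hx ⊢
    intro hxs
    exact hx ((PySem.Set.mem_add s c x).mpr (Or.inl hxs))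

-- A's loop finding a repeat exhibits a key with a never-ending chain
theorem pvWalkA_true (d : List (Int × Option Int)) :
    ∀ fu (seen : PySem.Set Int) (c : Int),
      pvWalkA d fu seen (some c) = true →
      (∀ x ∈ seen, pvReach d x (some c)) → pvS d := by
  intro fu
  induction fu with
  | zero => intro seen c h _; simp [pvWalkA] at h
  | succ fu ih =>
      intro seen c h hseen
      rw [pvWalkA] at h
      by_cases hc : c ∈ seen
      · exact pvCycle_found d (hseen c hc)
      · rw [if_neg hc] at h
        cases hg : pvGet d c with
        | none => rw [hg] at h; simp [pvWalkA] at h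
        | some d' =>
            rw [hg] at h
            have hstep : pvIter d 1 (some c) = some d' := by
              show pvGet d c = some d'
              exact hg
            refine ih (PySem.Set.add seen c) d' h ?_
            intro x hx
            rcases (PySem.Set.mem_add seen c x).mp hx with hx' | rfl
            · obtain ⟨m, hm1, hm⟩ := hseen x hx'
              exact ⟨m + 1, by omega, by rw [pvIter_add, hm, hstep]⟩
            · exact ⟨1, le_refl 1, hstep⟩

-- with enough fuel, A's loop finds the repeat on a never-ending chain
theorem pvWalkA_of_inf (d : List (Int × Option Int)) :
    ∀ fu (seen : PySem.Set Int) (c : Int), pvInf d c →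
      (((PySem.Dict.mk d).keys.dedup.filter (fun x => decide (x ∉ seen))).length < fu) →
      pvWalkA d fu seen (some c) = true := by
  intro fu
  induction fu with
  | zero => intro seen c _ hlt; omega
  | succ fu ih =>
      intro seen c hinf hlt
      rw [pvWalkA]
      by_cases hc : c ∈ seen
      · rw [if_pos hc]
      · rw [if_neg hc]
        obtain ⟨d', hg, hinf'⟩ := pvInf_step d hinf
        rw [hg]
        apply ih _ _ hinf'
        have hckey : c ∈ (PySem.Dict.mk d).keys := pvKey_of_get d (by rw [hg]; simp)
        have hlt2 := pvFilter_lt ((PySem.Dict.mk d).keys.dedup) seen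
          (List.mem_dedup.mpr hckey) hc
        omega

theorem pvFuel_init (d : List (Int × Option Int)) :
    (((PySem.Dict.mk d).keys.dedup.filter
        (fun x => decide (x ∉ (PySem.Set.empty : PySem.Set Int)))).length < d.length + 1) := by
  have h1 : ((PySem.Dict.mk d).keys.dedup.filter
      (fun x => decide (x ∉ (PySem.Set.empty : PySem.Set Int)))) = (PySem.Dict.mk d).keys.dedup := by
    simp [PySem.Set.empty]
  have h2 := List.Sublist.length_le ((PySem.Dict.mk d).keys.dedup_sublist)
  have h3 : (PySem.Dict.mk d).keys.length = d.length := by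
    rw [PySem.Dict.keys_mk]; simp
  rw [h1]
  omega

theorem pvA_iff (d : List (Int × Option Int)) :
    upline_chain_cycles_py d = true ↔ pvS d := by
  unfold upline_chain_cycles_py
  constructor
  · intro h
    obtain ⟨s, hs, hw⟩ := List.any_eq_true.mp h
    exact pvWalkA_true d _ _ _ hw (by intro x hx; simp [PySem.Set.empty] at hx)
  · rintro ⟨k, hk, hinf⟩
    exact List.any_eq_true.mpr ⟨k, hk, pvWalkA_of_inf d _ _ _ hinf (pvFuel_init d)⟩

-- B's loop returning none exhibits a key with a never-ending chain
theorem pvWalkB_none (d : List (Int × Option Int)) :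
    ∀ fu (done path : PySem.Set Int) (c : Int),
      pvWalkB d fu done path (some c) = none →
      (∀ x ∈ path, pvReach d x (some c)) → pvS d := by
  intro fu
  induction fu with
  | zero => intro done path c h _; simp [pvWalkB] at h
  | succ fu ih =>
      intro done path c h hpath
      rw [pvWalkB] at h
      by_cases hc : c ∈ done
      · rw [if_pos hc] at h; cases h
      · rw [if_neg hc] at h
        by_cases hcp : c ∈ path
        · exact pvCycle_found d (hpath c hcp)
        · rw [if_neg hcp] at h
          cases hg : pvGet d c with
          | none => rw [hg] at h; simp [pvWalkB] at h
          | some d' =>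
              rw [hg] at h
              have hstep : pvIter d 1 (some c) = some d' := hg
              refine ih done (PySem.Set.add path c) d' h ?_
              intro x hx
              rcases (PySem.Set.mem_add path c x).mp hx with hx' | rfl
              · obtain ⟨m, hm1, hm⟩ := hpath x hx'
                exact ⟨m + 1, by omega, by rw [pvIter_add, hm, hstep]⟩
              · exact ⟨1, le_refl 1, hstep⟩

-- when B's loop completes, every node of the returned path has an ending chain
theorem pvWalkB_some (d : List (Int × Option Int)) :
    ∀ fu (done path : PySem.Set Int) (c : Int) (path' : PySem.Set Int),
      (∀ x ∈ path, pvReach d x (some c)) →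
      (∀ x ∈ done, pvFin d x) →
      (((PySem.Dict.mk d).keys.dedup.filter (fun x => decide (x ∉ path))).length < fu) →
      pvWalkB d fu done path (some c) = some path' →
      ∀ x ∈ path', pvFin d x := by
  intro fu
  induction fu with
  | zero => intro done path c path' _ _ hlt _; omega
  | succ fu ih =>
      intro done path c path' hpath hdone hlt heq
      rw [pvWalkB] at heq
      by_cases hc : c ∈ done
      · rw [if_pos hc] at heq
        injection heq with heq
        subst heq
        intro x hx
        exact pvFin_back d (hpath x hx) (hdone c hc)
      · rw [if_neg hc] at heq
        by_cases hcp : c ∈ path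
        · rw [if_pos hcp] at heq; cases heq
        · rw [if_neg hcp] at heq
          cases hg : pvGet d c with
          | none =>
              rw [hg] at heq
              have hpe : path' = PySem.Set.add path c := by
                cases fu <;> simpa [pvWalkB] using heq.symm
              subst hpe
              have hfinc : pvFin d c := ⟨1, hg⟩
              intro x hx
              rcases (PySem.Set.mem_add path c x).mp hx with hx' | rfl
              · exact pvFin_back d (hpath x hx') hfinc
              · exact hfinc
          | some d' =>
              rw [hg] at heq
              have hstep : pvIter d 1 (some c) = some d' := hg
              have hckey : c ∈ (PySem.Dict.mk d).keys := pvKey_of_get d (by rw [hg]; simp)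
              have hlt2 := pvFilter_lt ((PySem.Dict.mk d).keys.dedup) path
                (List.mem_dedup.mpr hckey) hcp
              refine ih done (PySem.Set.add path c) d' path' ?_ hdone (by omega) heq
              intro x hx
              rcases (PySem.Set.mem_add path c x).mp hx with hx' | rfl
              · obtain ⟨m, hm1, hm⟩ := hpath x hx'
                exact ⟨m + 1, by omega, by rw [pvIter_add, hm, hstep]⟩
              · exact ⟨1, le_refl 1, hstep⟩

-- on a never-ending chain B's loop must report the cycle
theorem pvWalkB_of_inf (d : List (Int × Option Int)) :
    ∀ fu (done path : PySem.Set Int) (c : Int), pvInf d c →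
      (∀ x ∈ done, pvFin d x) →
      (((PySem.Dict.mk d).keys.dedup.filter (fun x => decide (x ∉ path))).length < fu) →
      pvWalkB d fu done path (some c) = none := by
  intro fu
  induction fu with
  | zero => intro done path c _ _ hlt; omega
  | succ fu ih =>
      intro done path c hinf hdone hlt
      rw [pvWalkB]
      by_cases hc : c ∈ done
      · obtain ⟨n, hn⟩ := hdone c hc
        exact absurd hn (hinf n)
      · rw [if_neg hc]
        by_cases hcp : c ∈ path
        · rw [if_pos hcp]
        · rw [if_neg hcp]
          obtain ⟨d', hg, hinf'⟩ := pvInf_step d hinf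
          rw [hg]
          apply ih _ _ _ hinf' hdone
          have hckey : c ∈ (PySem.Dict.mk d).keys := pvKey_of_get d (by rw [hg]; simp)
          have hlt2 := pvFilter_lt ((PySem.Dict.mk d).keys.dedup) path
            (List.mem_dedup.mpr hckey) hcp
          omega

theorem pvLoopB_true (d : List (Int × Option Int)) :
    ∀ (rest : List Int) (done : PySem.Set Int),
      (∀ x ∈ done, pvFin d x) → pvLoopB d done rest = true → pvS d := by
  intro rest
  induction rest with
  | nil => intro done _ h; simp [pvLoopB] at h
  | cons k rest ih =>
      intro done hdone h
      rw [pvLoopB] at h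
      cases hw : pvWalkB d (d.length + 1) done PySem.Set.empty (some k) with
      | none => exact pvWalkB_none d _ _ _ _ hw (by intro x hx; simp [PySem.Set.empty] at hx)
      | some path =>
          rw [hw] at h
          refine ih (PySem.Set.union done path) ?_ h
          intro x hx
          rcases (PySem.Set.mem_union done path x).mp hx with hx' | hx'
          · exact hdone x hx'
          · exact pvWalkB_some d _ _ _ _ _
              (by intro y hy; simp [PySem.Set.empty] at hy) hdone (pvFuel_init d) hw x hx'

theorem pvLoopB_of_S (d : List (Int × Option Int)) :
    ∀ (rest : List Int) (done : PySem.Set Int),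
      (∀ x ∈ done, pvFin d x) → (∃ k, k ∈ rest ∧ pvInf d k) →
      pvLoopB d done rest = true := by
  intro rest
  induction rest with
  | nil => rintro done _ ⟨k, hk, -⟩; cases hk
  | cons k0 rest ih =>
      rintro done hdone ⟨k, hk, hinf⟩
      rw [pvLoopB]
      cases hw : pvWalkB d (d.length + 1) done PySem.Set.empty (some k0) with
      | none => rfl
      | some path =>
          rcases List.mem_cons.mp hk with rfl | hk'
          · rw [pvWalkB_of_inf d _ _ _ _ hinf hdone (pvFuel_init d)] at hw
            cases hw
          · have hdone' : ∀ x ∈ PySem.Set.union done path, pvFin d x := by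
              intro x hx
              rcases (PySem.Set.mem_union done path x).mp hx with hx' | hx'
              · exact hdone x hx'
              · exact pvWalkB_some d _ _ _ _ _
                  (by intro y hy; simp [PySem.Set.empty] at hy) hdone (pvFuel_init d) hw x hx'
            exact ih (PySem.Set.union done path) hdone' ⟨k, hk', hinf⟩

theorem pvB_iff (d : List (Int × Option Int)) :
    upline_chain_cycles_py_alt d = true ↔ pvS d := by
  unfold upline_chain_cycles_py_alt
  constructor
  · exact pvLoopB_true d _ _ (by intro x hx; simp [PySem.Set.empty] at hx)
  · rintro ⟨k, hk, hinf⟩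
    exact pvLoopB_of_S d _ _ (by intro x hx; simp [PySem.Set.empty] at hx) ⟨k, hk, hinf⟩

-- ===== VERDICT (by name: the statement is the Claim_ definition above) =====
theorem upline_chain_cycles_py_spec : Claim_equal_upline_chain_cycles_py := by
  intro u _
  unfold Spec_upline_chain_cycles_py
  rw [Bool.eq_iff_iff, pvA_iff, pvB_iff]
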